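-- pv_equiv track=rewrite | github.com/glados-creator/NSI_lycee | terminal/structure/struc file/PAVARD réponse.py | supplast
-- ===== SOURCE A (Python) =====
-- from copy import deepcopy
--
-- def vide(f):
--     ''' renvoie True si la file est vide
--     False sinon'''
--     return f == []
--
-- def pile():
--     return []
--
-- def empiler(p, x):
--     "Ajoute l'élément x à la pile p"
--     p.append(x)
--
-- def depiler(p):
--     "dépile et renvoie l'élément au sommet de la pile p"
--     return p.pop()
--
-- def enfiler(f, x):
--     # ajoute x à la file f"
--     return f.append(x)
--
-- def defiler(f):
--     # enlève et renvoie le premier élément de la file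
--     return f.pop(0)
--
-- def supplast(f1):
--     f = deepcopy(f1)
--     p = pile()
--     while not vide(f):
--         empiler(p,defiler(f))
--     # f[-1::]
--     depiler(p)
--     while not vide(p):
--         enfiler(f,depiler(p))
--     while not vide(f):
--         empiler(p,defiler(f))
--     while not vide(p):
--         enfiler(f,depiler(p))
--     return f
-- ===== SOURCE B (Python) =====
-- from copy import deepcopy
--
-- def supplast(f1):
--     f = deepcopy(f1)
--     f.pop()  # raises IndexError on empty, like A
--     return f
-- ===== Notes on version B (the rewrite author's own statement) =====
-- stated objective: simpler
-- what changed: Replaces the four push/pop loops through an auxiliary stack (equivalent to two full reversals) with a single deepcopy followed by pop() of the last element; no loops, no stack.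
import Mathlib
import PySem

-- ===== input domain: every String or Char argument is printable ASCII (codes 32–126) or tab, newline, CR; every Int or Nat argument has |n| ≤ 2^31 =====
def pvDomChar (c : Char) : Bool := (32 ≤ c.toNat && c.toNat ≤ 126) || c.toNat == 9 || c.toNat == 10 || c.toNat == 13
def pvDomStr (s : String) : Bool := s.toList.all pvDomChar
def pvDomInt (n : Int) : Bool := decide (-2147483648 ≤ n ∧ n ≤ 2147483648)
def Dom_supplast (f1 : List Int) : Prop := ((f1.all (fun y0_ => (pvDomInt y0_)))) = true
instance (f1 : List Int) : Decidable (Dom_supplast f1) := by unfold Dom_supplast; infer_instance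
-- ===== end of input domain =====

-- B removes the last element with deepcopy + pop() instead of A's four push/pop loops
-- through an auxiliary stack (objective: simpler). Neither program mutates f1.

-- ===== PORT A =====
-- while not vide(f): empiler(p, defiler(f))  — pop front of f, append to p
def supplastLoopFP : List Int → List Int → List Int
  | [], p => p
  | x :: rest, p => supplastLoopFP rest (p ++ [x])

-- while not vide(p): enfiler(f, depiler(p))  — pop back of p, append to f
def supplastLoopPF (p f : List Int) : List Int :=
  if h : p = [] then f
  else supplastLoopPF p.dropLast (f ++ [p.getLast h])
termination_by p.length
decreasing_by
  simp only [List.length_dropLast]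
  have := List.length_pos_of_ne_nil h
  omega

def supplast (f1 : List Int) : List Int :=
  let p1 := supplastLoopFP f1 []          -- first loop: f emptied into stack p
  let p2 := p1.dropLast                   -- depiler(p): discard top (Pre_ excludes empty, where Python raises IndexError)
  let f2 := supplastLoopPF p2 []          -- second loop: stack back into queue
  let p3 := supplastLoopFP f2 []          -- third loop
  supplastLoopPF p3 []                    -- fourth loop

-- ===== PORT B =====
def supplast_alt (f1 : List Int) : List Int :=
  f1.dropLast                             -- deepcopy then pop(): drop the last element

-- ===== PRECONDITION & SPEC =====
-- Pre_ excludes the empty list, on which both A and B raise IndexError (pop from empty list).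
def Pre_supplast (f1 : List Int) : Prop := f1 ≠ []
instance (f1 : List Int) : Decidable (Pre_supplast f1) := by unfold Pre_supplast; infer_instance
def pvWitness_supplast : List Int := [1, 2, 3]

def Spec_supplast (f1 : List Int) (out : List Int) : Prop := out = supplast_alt f1
instance (f1 : List Int) (out : List Int) : Decidable (Spec_supplast f1 out) := by unfold Spec_supplast; infer_instance

-- ===== CLAIM (what is proved, stated in full; the proofs are below) =====
def Claim_equal_supplast : Prop := ∀ (f1 : List Int), Dom_supplast f1 → Pre_supplast f1 → Spec_supplast f1 (supplast f1)

-- ===== LEMMAS AND PROOFS =====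
theorem loopFP_eq (f p : List Int) : supplastLoopFP f p = p ++ f := by
  induction f generalizing p with
  | nil => simp [supplastLoopFP]
  | cons x rest ih => simp [supplastLoopFP, ih]

theorem loopPF_eq (p f : List Int) : supplastLoopPF p f = f ++ p.reverse := by
  induction p using List.reverseRecOn generalizing f with
  | nil => rw [supplastLoopPF.eq_def]; simp
  | append_singleton p' x ih =>
      rw [supplastLoopPF.eq_def]
      simp [ih]

theorem supplast_eq_dropLast (f1 : List Int) : supplast f1 = f1.dropLast := by
  simp [supplast, loopFP_eq, loopPF_eq]

-- ===== VERDICT (by name: the statement is the Claim_ definition above) =====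
theorem supplast_spec : Claim_equal_supplast := by
  intro f1 _ _
  unfold Spec_supplast supplast_alt
  exact supplast_eq_dropLast f1
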